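-- pv_equiv track=rewrite | github.com/expectedparrot/edsl | edsl/conjure/qualtrics/vibe/processors/type_corrector.py | _is_numeric_scale
-- ===== SOURCE A (Python) =====
-- from typing import Dict, Any, Optional, List
--
-- def _is_numeric_scale(options: List) -> bool:
--     """Check if options represent a numeric scale (1-5, 1-10, etc.)."""
--     if len(options) < 3:
--         return False
--
--     # Check if all options are consecutive integers
--     try:
--         numeric_options = [int(opt) for opt in options]
--         numeric_options.sort()
--
--         # Check if consecutive integers
--         if len(numeric_options) >= 3:
--             for i in range(1, len(numeric_options)):
--                 if numeric_options[i] != numeric_options[i-1] + 1: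
--                     return False
--             return True
--     except:
--         pass
--
--     return False
-- ===== SOURCE B (Python) =====
-- def _is_numeric_scale(options) -> bool:
--     """Check if options represent a numeric scale (1-5, 1-10, etc.)."""
--     if len(options) < 3:
--         return False
--     try:
--         nums = [int(opt) for opt in options]
--     except:
--         return False
--     return len(set(nums)) == len(nums) and max(nums) - min(nums) == len(nums) - 1
-- ===== Notes on version B (the rewrite author's own statement) =====
-- stated objective: simpler
-- what changed: Replaced sort + adjacent-difference scan with an O(n) distinctness (set size) and range (max-min == n-1) test; no sorting, no index loop, and the redundant inner len>=3 check is gone.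
import Mathlib
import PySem

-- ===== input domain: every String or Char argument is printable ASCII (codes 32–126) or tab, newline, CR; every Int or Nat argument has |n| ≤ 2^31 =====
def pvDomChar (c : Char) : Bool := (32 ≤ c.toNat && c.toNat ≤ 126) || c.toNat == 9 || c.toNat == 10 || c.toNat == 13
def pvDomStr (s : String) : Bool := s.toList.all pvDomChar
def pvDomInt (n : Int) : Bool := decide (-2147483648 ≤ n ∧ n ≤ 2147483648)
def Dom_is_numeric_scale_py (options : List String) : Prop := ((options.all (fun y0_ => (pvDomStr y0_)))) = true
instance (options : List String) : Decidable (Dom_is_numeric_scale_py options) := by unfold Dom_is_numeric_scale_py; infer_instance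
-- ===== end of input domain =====

-- B replaces A's sort + adjacent-difference scan by a distinctness (set size) and range (max-min = n-1) test: simpler, no sort.
-- Python A mutates its local copy only (list.sort() on a fresh list), so return-value equivalence is the whole story.

-- ===== PORT A =====
-- [int(opt) for opt in options]: first failing conversion aborts with none (ValueError). Shared by both Pythons verbatim.
def convAll : List String → Option (List Int)
  | [] => some []
  | s :: t =>
    match PySem.Int.ofStr? s with
    | none => none
    | some n => (convAll t).map (n :: ·)

-- the 'for i in range(1, len): if l[i] != l[i-1]+1: return False / return True' adjacent scan
def consecCheck : List Int → Bool
  | a :: b :: t => if b ≠ a + 1 then false else consecCheck (b :: t)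
  | _ => true

def is_numeric_scale_py (options : List String) : Bool :=
  if options.length < 3 then false
  else
    match convAll options with
    | none => false
    | some nums =>
      let l := PySem.List.sorted nums (fun x => x) false
      if 3 ≤ l.length then consecCheck l else false

-- ===== PORT B =====
def is_numeric_scale_py_alt (options : List String) : Bool :=
  if options.length < 3 then false
  else
    match convAll options with
    | none => false
    | some nums =>
      match PySem.List.max? nums (fun x => x), PySem.List.min? nums (fun x => x) with
      | some mx, some mn =>
        decide ((PySem.Set.ofList nums).length = nums.length) &&
        decide (mx - mn = (nums.length : Int) - 1)
      | _, _ => false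

-- ===== PRECONDITION & SPEC =====
def Spec_is_numeric_scale_py (options : List String) (out : Bool) : Prop := out = is_numeric_scale_py_alt options
instance (options : List String) (out : Bool) : Decidable (Spec_is_numeric_scale_py options out) := by unfold Spec_is_numeric_scale_py; infer_instance

-- ===== CLAIM (what is proved, stated in full; the proofs are below) =====
def Claim_equal_is_numeric_scale_py : Prop := ∀ (options : List String), Dom_is_numeric_scale_py options → Spec_is_numeric_scale_py options (is_numeric_scale_py options)

-- ===== LEMMAS AND PROOFS =====

lemma len_convAll : ∀ {os : List String} {ns : List Int}, convAll os = some ns → ns.length = os.length := by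
  intro os
  induction os with
  | nil => intro ns h; simp [convAll] at h; simp [← h]
  | cons s t ih =>
    intro ns h
    simp only [convAll] at h
    cases hc : PySem.Int.ofStr? s with
    | none => rw [hc] at h; simp at h
    | some n =>
      rw [hc] at h
      cases ht : convAll t with
      | none => rw [ht] at h; simp at h
      | some ms =>
        rw [ht] at h
        simp at h
        subst h
        simp [ih ht]

lemma ofList_append_singleton {α : Type} [BEq α] (xs : List α) (x : α) :
    PySem.Set.ofList (xs ++ [x]) = PySem.Set.add (PySem.Set.ofList xs) x := by
  rw [PySem.Set.ofList_eq_foldl, PySem.Set.ofList_eq_foldl, List.foldl_append]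
  rfl

lemma nodup_of_len_ofList {α : Type} [BEq α] [LawfulBEq α] :
    ∀ (xs : List α), (PySem.Set.ofList xs).length = xs.length → xs.Nodup := by
  intro xs
  induction xs using List.reverseRecOn with
  | nil => intro _; simp
  | append_singleton t x ih =>
    intro h
    rw [ofList_append_singleton] at h
    by_cases hx : x ∈ PySem.Set.ofList t
    · exfalso
      have hx' : x ∈ t := (PySem.Set.mem_ofList t x).mp hx
      simp [PySem.Set.add, hx'] at h
      have := PySem.Set.length_ofList_le (xs := t)
      omega
    · have hxm : x ∉ t := fun hm => hx ((PySem.Set.mem_ofList t x).mpr hm)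
      simp [PySem.Set.add, hxm] at h
      have hnd := ih h
      simp [List.nodup_append, hnd]
      intro a ha he
      exact hxm (he ▸ ha)

lemma len_ofList_iff {α : Type} [BEq α] [LawfulBEq α] (xs : List α) :
    (PySem.Set.ofList xs).length = xs.length ↔ xs.Nodup := by
  constructor
  · exact nodup_of_len_ofList xs
  · intro h; rw [PySem.Set.ofList_eq_self_of_nodup xs h]

lemma consec_affine : ∀ (t : List Int) (a : Int),
    consecCheck (a :: t) = true ↔ ∀ i (h : i < t.length + 1), (a :: t)[i] = a + i := by
  intro t
  induction t with
  | nil =>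
    intro a
    simp only [consecCheck, List.length_nil, Nat.zero_add, true_iff]
    intro i h
    interval_cases i
    simp
  | cons b t' ih =>
    intro a
    by_cases hb : b = a + 1
    · subst hb
      rw [show consecCheck (a :: (a + 1) :: t') = consecCheck ((a + 1) :: t') by
        simp [consecCheck]]
      rw [ih (a + 1)]
      constructor
      · intro H i h
        cases i with
        | zero => simp
        | succ j =>
          have hj := H j (by simpa using h)
          simp only [List.getElem_cons_succ]
          push_cast at hj ⊢
          omega
      · intro H i h
        have hj := H (i + 1) (by simpa using h)
        simp only [List.getElem_cons_succ] at hj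
        push_cast at hj ⊢
        omega
    · rw [show consecCheck (a :: b :: t') = false by simp [consecCheck, hb]]
      constructor
      · intro h; exact absurd h (by simp)
      · intro H
        have h1 := H 1 (by simp)
        simp at h1
        exact absurd h1 hb

lemma consec_affine' (l : List Int) (hl : l ≠ []) :
    consecCheck l = true ↔
      ∀ i (h : i < l.length), l[i] = l[0]'(List.length_pos_of_ne_nil hl) + i := by
  cases l with
  | nil => exact absurd rfl hl
  | cons a t => simpa using consec_affine t a

lemma growth (l : List Int) (hstrict : ∀ i j (_ : i < j) (hj : j < l.length), l[i]'(by omega) < l[j]) :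
    ∀ (d i : Nat) (h : i + d < l.length), l[i]'(by omega) + d ≤ l[i + d] := by
  intro d
  induction d with
  | zero => intro i h; simp
  | succ e ih =>
    intro i h
    have h1 := ih i (by omega)
    have h2 := hstrict (i + e) (i + e + 1) (by omega) (by omega)
    show l[i]'(by omega) + ((e : Int) + 1) ≤ l[i + e + 1]'(by omega)
    push_cast at h1
    omega

lemma key_lemma (nums : List Int) (mx mn : Int) (h1 : nums ≠ [])
    (hmx : PySem.List.max? nums (fun x => x) = some mx)
    (hmn : PySem.List.min? nums (fun x => x) = some mn) :
    consecCheck (PySem.List.sorted nums (fun x => x) false) =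
      (decide ((PySem.Set.ofList nums).length = nums.length) &&
       decide (mx - mn = (nums.length : Int) - 1)) := by
  set l := PySem.List.sorted nums (fun x => x) false with hldef
  have hperm : l.Perm nums := PySem.List.sorted_perm nums (fun x => x) false
  have hlen : l.length = nums.length := hperm.length_eq
  have hlne : l ≠ [] := by
    intro h
    rw [h] at hlen
    exact h1 (List.length_eq_zero_iff.mp hlen.symm)
  have hpos : 0 < l.length := List.length_pos_of_ne_nil hlne
  have hmono : ∀ p q (hpq : p ≤ q) (hq : q < l.length), l[p]'(by omega) ≤ l[q] := by
    intro p q hpq hq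
    exact PySem.List.sorted_id_getElem_mono nums hpq hq
  have hmem : ∀ y, y ∈ nums ↔ y ∈ l := fun y => (hperm.mem_iff).symm
  have hminle : ∀ y ∈ nums, mn ≤ y := PySem.List.min?_isMin hmn
  have hmaxge : ∀ y ∈ nums, y ≤ mx := PySem.List.max?_isMax hmx
  have hmnmem : mn ∈ nums := PySem.List.min?_mem hmn
  have hmxmem : mx ∈ nums := PySem.List.max?_mem hmx
  have h0mem : l[0]'hpos ∈ nums := (hmem _).mpr (l.getElem_mem hpos)
  have hlastmem : l[l.length - 1]'(by omega) ∈ nums := (hmem _).mpr (l.getElem_mem (by omega))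
  -- min is the head, max is the last element of the sorted list (needs only sortedness)
  have hmn0 : mn = l[0]'hpos := by
    obtain ⟨j, hj, hjv⟩ := List.mem_iff_getElem.mp ((hmem mn).mp hmnmem)
    have h1' := hmono 0 j (by omega) hj
    have h2' := hminle _ h0mem
    omega
  have hmxl : mx = l[l.length - 1]'(by omega) := by
    obtain ⟨j, hj, hjv⟩ := List.mem_iff_getElem.mp ((hmem mx).mp hmxmem)
    have h1' := hmono j (l.length - 1) (by omega) (by omega)
    have h2' := hmaxge _ hlastmem
    omega
  rw [Bool.eq_iff_iff, consec_affine' l hlne]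
  simp only [Bool.and_eq_true, decide_eq_true_eq, len_ofList_iff]
  constructor
  · intro P
    have hndl : l.Nodup := by
      rw [List.nodup_iff_injective_getElem]
      intro ⟨i, hi⟩ ⟨j, hj⟩ hij
      simp only at hij
      rw [P i hi, P j hj] at hij
      have : (i : Int) = j := by omega
      exact Fin.ext (by exact_mod_cast this)
    refine ⟨hperm.nodup hndl, ?_⟩
    have hA := P (l.length - 1) (by omega)
    rw [hmn0, hmxl, hA, hlen.symm]
    omega
  · rintro ⟨hnd, hrange⟩
    have hndl : l.Nodup := (hperm.nodup_iff).mpr hnd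
    have hstrict : ∀ i j (_ : i < j) (hj : j < l.length), l[i]'(by omega) < l[j] := by
      intro i j hij hj
      have hle := hmono i j (by omega) hj
      have hne : l[i]'(by omega) ≠ l[j] := by
        intro he
        have := List.nodup_iff_injective_getElem.mp hndl
          (a₁ := ⟨i, by omega⟩) (a₂ := ⟨j, hj⟩) he
        have : i = j := congrArg Fin.val this
        omega
      omega
    intro i h
    have hA := growth l hstrict i 0 (by omega)
    have hB := growth l hstrict (l.length - 1 - i) i (by omega)
    simp only [Nat.zero_add] at hA
    have hidx : i + (l.length - 1 - i) = l.length - 1 := by omega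
    simp only [hidx] at hB
    rw [hmn0, hmxl, ← hlen] at hrange
    have hcast : ((l.length - 1 - i : Nat) : Int) = (l.length : Int) - 1 - i := by
      omega
    rw [hcast] at hB
    omega

-- ===== VERDICT (by name: the statement is the Claim_ definition above) =====
theorem is_numeric_scale_py_spec : Claim_equal_is_numeric_scale_py := by
  intro options _
  unfold Spec_is_numeric_scale_py is_numeric_scale_py is_numeric_scale_py_alt
  by_cases hlt : options.length < 3
  · simp [hlt]
  · simp only [hlt, if_false]
    cases hc : convAll options with
    | none => rfl
    | some nums =>
      have hnlen : nums.length = options.length := len_convAll hc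
      have hne : nums ≠ [] := by
        intro h
        rw [h] at hnlen
        simp at hnlen
        omega
      cases hmx : PySem.List.max? nums (fun x => x) with
      | none => exact absurd ((PySem.List.max?_eq_none_iff _ _).mp hmx) hne
      | some mx =>
        cases hmn : PySem.List.min? nums (fun x => x) with
        | none => exact absurd ((PySem.List.min?_eq_none_iff _ _).mp hmn) hne
        | some mn =>
          have h3 : 3 ≤ (PySem.List.sorted nums (fun x => x) false).length := by
            rw [PySem.List.length_sorted, hnlen]
            omega
          show (if 3 ≤ (PySem.List.sorted nums (fun x => x) false).length
              then consecCheck (PySem.List.sorted nums (fun x => x) false) else false) =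
            (match PySem.List.max? nums (fun x => x), PySem.List.min? nums (fun x => x) with
             | some mx, some mn =>
               decide ((PySem.Set.ofList nums).length = nums.length) &&
               decide (mx - mn = (nums.length : Int) - 1)
             | _, _ => false)
          rw [hmx, hmn, if_pos h3]
          exact key_lemma nums mx mn hne hmx hmn
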